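-- pv_equiv track=rewrite | github.com/blackpeachDio/RawAgent | examples/graphrag_pipeline_mini_demo.py | subgraph_k_hop
-- ===== SOURCE A (Python) =====
-- from collections import defaultdict, deque
--
-- def subgraph_k_hop(g: dict[str, set[str]], center: str, k: int = 1) -> set[str]:
--     """从 center 出发 k 跳内的节点（BFS）。用于「局部」检索上下文。"""
--     if center not in g:
--         return set()
--     seen = {center}
--     q = deque([(center, 0)])
--     while q:
--         u, d = q.popleft()
--         if d >= k:
--             continue
--         for v in g[u]:
--             if v not in seen:
--                 seen.add(v)
--                 q.append((v, d + 1))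
--     return seen
-- ===== SOURCE B (Python) =====
-- def subgraph_k_hop(g: dict[str, set[str]], center: str, k: int = 1) -> set[str]:
--     """Queue-free BFS: keep only a node->distance table and, round by round,
--     rescan the whole table for the nodes at the current distance."""
--     if center not in g:
--         return set()
--     dist = {center: 0}
--     r = 0
--     while r < k:
--         grew = False
--         for u in list(dist):
--             if dist[u] == r:
--                 for v in g[u]:
--                     if v not in dist:
--                         dist[v] = r + 1
--                         grew = True
--         if not grew:
--             break
--         r += 1
--     return set(dist)
-- ===== Notes on version B (the rewrite author's own statement) =====
-- stated objective: alternative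
-- what changed: Replaced the (node, depth)-tagged FIFO deque and separate visited set by a queue-free, round-based scheme: a single node-to-distance table is rescanned once per round, expanding exactly the nodes whose stored distance equals the round number, with an early stop when a round discovers nothing.
import Mathlib
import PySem

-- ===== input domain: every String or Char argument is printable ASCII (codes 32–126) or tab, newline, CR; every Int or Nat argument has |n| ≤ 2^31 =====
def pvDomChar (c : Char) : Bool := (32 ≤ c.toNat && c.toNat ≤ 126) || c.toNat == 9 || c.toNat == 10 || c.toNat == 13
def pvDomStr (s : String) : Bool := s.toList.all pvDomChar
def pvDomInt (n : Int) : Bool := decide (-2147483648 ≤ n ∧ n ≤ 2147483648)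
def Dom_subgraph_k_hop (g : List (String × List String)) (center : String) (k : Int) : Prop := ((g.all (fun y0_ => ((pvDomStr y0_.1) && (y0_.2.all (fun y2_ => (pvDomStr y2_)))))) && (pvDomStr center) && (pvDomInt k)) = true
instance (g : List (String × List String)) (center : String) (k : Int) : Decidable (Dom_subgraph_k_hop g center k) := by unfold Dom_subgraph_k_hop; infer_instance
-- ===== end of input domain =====

-- B replaces A's (node, depth)-tagged FIFO deque + visited set by a queue-free round scheme:
-- one node→distance table, rescanned once per round for the nodes at the current distance
-- (objective: alternative — no queue and no separate visited set); same return value, proved below.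

-- ===== PORT A =====
-- A's while-loop over the deque of (node, depth) pairs; the fuel argument only makes the
-- recursion total (it is chosen large enough to never run out, see subgraph_k_hop_spec).
-- 'g[u]' is ported as getD with default [] — exact under Pre_, which excludes the KeyError inputs.
def pvLoopA (g : List (String × List String)) (k : Int) :
    Nat → PySem.Set String → List (String × Int) → List String
  | 0, seen, _ => seen
  | _ + 1, seen, [] => seen
  | fuel + 1, seen, (u, d) :: q =>
    if d ≥ k then pvLoopA g k fuel seen q
    else
      let st := ((PySem.Dict.mk g).getD u []).foldl
        (fun (st : PySem.Set String × List (String × Int)) v =>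
          if v ∈ st.1 then st else (PySem.Set.add st.1 v, st.2 ++ [(v, d + 1)]))
        (seen, q)
      pvLoopA g k fuel st.1 st.2

def subgraph_k_hop (g : List (String × List String)) (center : String) (k : Int) : List String :=
  if (PySem.Dict.mk g).contains center then
    pvLoopA g k ((g.flatMap (fun p => p.2)).length + 2) [center] [(center, 0)]
  else []

-- ===== PORT B =====
-- one round of B: fold over the snapshot list(dist) of keys, expanding the nodes whose stored
-- distance is r; 'dist[u]' is ported as getD 0 (u is always a key of dist) and 'g[u]' as
-- getD [] (exact under Pre_); the Bool is the 'grew' flag.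
def pvRound (g : List (String × List String)) (r : Int) (dist : PySem.Dict String Int) :
    PySem.Dict String Int × Bool :=
  dist.keys.foldl
    (fun (st : PySem.Dict String Int × Bool) u =>
      if st.1.getD u 0 == r then
        ((PySem.Dict.mk g).getD u []).foldl
          (fun (st : PySem.Dict String Int × Bool) v =>
            if st.1.contains v then st else (st.1.insert v (r + 1), true))
          st
      else st)
    (dist, false)

-- B's 'while r < k' loop: the fuel counts the remaining rounds (k - r), the early break
-- fires when a round discovered nothing ('if not grew: break')
def pvLoopB2 (g : List (String × List String)) :
    Nat → Int → PySem.Dict String Int → PySem.Dict String Int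
  | 0, _, dist => dist
  | n + 1, r, dist =>
    let st := pvRound g r dist
    if st.2 then pvLoopB2 g n (r + 1) st.1 else st.1

def subgraph_k_hop_alt (g : List (String × List String)) (center : String) (k : Int) : List String :=
  if (PySem.Dict.mk g).contains center then
    PySem.Set.ofList ((pvLoopB2 g k.toNat 0 (PySem.Dict.mk [(center, 0)])).keys)
  else []

-- ===== PRECONDITION & SPEC =====
-- pvBall g n s: the n-step neighbourhood closure of the node set s in g (missing keys add nothing)
def pvBall (g : List (String × List String)) : Nat → PySem.Set String → PySem.Set String
  | 0, s => s
  | n + 1, s => pvBall g n (PySem.Set.update s (s.flatMap (fun u => (PySem.Dict.mk g).getD u [])))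

-- Pre_ excludes exactly the inputs on which Python A raises KeyError: center has an entry but
-- some node within k-1 hops of it lacks one (the hop count is capped at the graph size, past
-- which the ball is stable, so that the condition stays checkable for huge k).
def Pre_subgraph_k_hop (g : List (String × List String)) (center : String) (k : Int) : Prop :=
  (PySem.Dict.mk g).contains center = false ∨
    ∀ v ∈ pvBall g (min (k - 1).toNat ((g.flatMap (fun p => p.2)).length + 1)) [center],
      (PySem.Dict.mk g).contains v = true
instance (g : List (String × List String)) (center : String) (k : Int) : Decidable (Pre_subgraph_k_hop g center k) := by unfold Pre_subgraph_k_hop; infer_instance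

def pvWitness_subgraph_k_hop : (List (String × List String)) × String × Int :=
  ([("a", ["b"]), ("b", ["a", "c"]), ("c", [])], "a", 2)

def Spec_subgraph_k_hop (g : List (String × List String)) (center : String) (k : Int) (out : List String) : Prop := out = subgraph_k_hop_alt g center k
instance (g : List (String × List String)) (center : String) (k : Int) (out : List String) : Decidable (Spec_subgraph_k_hop g center k out) := by unfold Spec_subgraph_k_hop; infer_instance

-- ===== CLAIM (what is proved, stated in full; the proofs are below) =====
def Claim_equal_subgraph_k_hop : Prop := ∀ (g : List (String × List String)) (center : String) (k : Int), Dom_subgraph_k_hop g center k → Pre_subgraph_k_hop g center k → Spec_subgraph_k_hop g center k (subgraph_k_hop g center k)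

-- ===== LEMMAS AND PROOFS =====

-- Proof-side reference algorithm: level-synchronous expansion (used only to bridge A and B).
def pvExpand (g : List (String × List String)) (seen : PySem.Set String)
    (frontier : List String) : PySem.Set String × List String :=
  frontier.foldl
    (fun st u => ((PySem.Dict.mk g).getD u []).foldl
      (fun (st : PySem.Set String × List String) v =>
        if v ∈ st.1 then st else (PySem.Set.add st.1 v, st.2 ++ [v])) st)
    (seen, [])

def pvLoopB (g : List (String × List String)) :
    Nat → PySem.Set String → List String → List String
  | 0, seen, _ => seen
  | n + 1, seen, frontier =>
    let st := pvExpand g seen frontier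
    if st.2 = [] then st.1 else pvLoopB g n st.1 st.2

-- ---- A-side: the deque loop equals the level loop pvLoopB ----

theorem pvLoopA_nil (g : List (String × List String)) (k : Int) (fuel : Nat)
    (seen : PySem.Set String) : pvLoopA g k fuel seen [] = seen := by
  cases fuel <;> rfl

-- queue entries at depth ≥ k are drained without effect
theorem pvLoopA_drain (g : List (String × List String)) (k d : Int) (hd : k ≤ d) :
    ∀ (G : List String) (fuel : Nat) (seen : PySem.Set String),
      pvLoopA g k (G.length + fuel) seen (G.map (fun v => (v, d))) = seen := by
  intro G
  induction G with
  | nil => intro fuel seen; simpa using pvLoopA_nil g k fuel seen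
  | cons v G ih =>
    intro fuel seen
    rw [show (v :: G).length + fuel = (G.length + fuel) + 1 by simp; omega,
        List.map_cons, pvLoopA]
    simp only [ge_iff_le, hd, if_true]
    exact ih fuel seen

-- one node's neighbour fold: A's (seen, queue) fold is the (seen, nxt) fold with the
-- new entries depth-tagged and appended behind the fixed queue prefix q
theorem pvInner (d : Int) (vs : List String) :
    ∀ (seen : PySem.Set String) (q : List (String × Int)) (nxt : List String),
      vs.foldl
        (fun (st : PySem.Set String × List (String × Int)) v =>
          if v ∈ st.1 then st else (PySem.Set.add st.1 v, st.2 ++ [(v, d + 1)]))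
        (seen, q ++ nxt.map (fun v => (v, d + 1)))
      = ((vs.foldl
            (fun (st : PySem.Set String × List String) v =>
              if v ∈ st.1 then st else (PySem.Set.add st.1 v, st.2 ++ [v])) (seen, nxt)).1,
         q ++ ((vs.foldl
            (fun (st : PySem.Set String × List String) v =>
              if v ∈ st.1 then st else (PySem.Set.add st.1 v, st.2 ++ [v])) (seen, nxt)).2).map
              (fun v => (v, d + 1))) := by
  induction vs with
  | nil => intro seen q nxt; rfl
  | cons v vs ih =>
    intro seen q nxt
    simp only [List.foldl_cons]
    by_cases hv : v ∈ seen
    · simp only [hv, if_true]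
      exact ih seen q nxt
    · simp only [hv, if_false]
      have : q ++ nxt.map (fun v => (v, d + 1)) ++ [(v, d + 1)]
          = q ++ (nxt ++ [v]).map (fun v => (v, d + 1)) := by
        simp
      rw [this]
      exact ih (PySem.Set.add seen v) q (nxt ++ [v])

-- draining one whole level of A's queue is the pvExpand-style fold over the frontier
theorem pvLevel (g : List (String × List String)) (k d : Int) (hd : d < k) :
    ∀ (F : List String) (G : List String) (seen : PySem.Set String) (fuel : Nat),
      pvLoopA g k (F.length + fuel) seen
        (F.map (fun u => (u, d)) ++ G.map (fun v => (v, d + 1)))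
      = pvLoopA g k fuel
          (F.foldl
            (fun st u => ((PySem.Dict.mk g).getD u []).foldl
              (fun (st : PySem.Set String × List String) v =>
                if v ∈ st.1 then st else (PySem.Set.add st.1 v, st.2 ++ [v])) st)
            (seen, G)).1
          (((F.foldl
            (fun st u => ((PySem.Dict.mk g).getD u []).foldl
              (fun (st : PySem.Set String × List String) v =>
                if v ∈ st.1 then st else (PySem.Set.add st.1 v, st.2 ++ [v])) st)
            (seen, G)).2).map (fun v => (v, d + 1))) := by
  intro F
  induction F with
  | nil => intro G seen fuel; simp
  | cons u F ih =>
    intro G seen fuel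
    rw [show (u :: F).length + fuel = (F.length + fuel) + 1 by simp; omega,
        List.map_cons, List.cons_append, pvLoopA]
    have hnd : ¬ d ≥ k := not_le.mpr hd
    simp only [hnd, if_false]
    have h := pvInner d ((PySem.Dict.mk g).getD u []) seen
      (F.map (fun u => (u, d))) G
    simp only [h]
    exact ih _ _ fuel

-- the expansion fold grows seen and nxt by the same amount
theorem pvGrow_inner (vs : List String) :
    ∀ (st : PySem.Set String × List String),
      ((vs.foldl
        (fun (st : PySem.Set String × List String) v =>
          if v ∈ st.1 then st else (PySem.Set.add st.1 v, st.2 ++ [v])) st).1).length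
        + st.2.length
      = st.1.length + ((vs.foldl
        (fun (st : PySem.Set String × List String) v =>
          if v ∈ st.1 then st else (PySem.Set.add st.1 v, st.2 ++ [v])) st).2).length := by
  induction vs with
  | nil => intro st; rfl
  | cons v vs ih =>
    intro st
    simp only [List.foldl_cons]
    by_cases hv : v ∈ st.1
    · simp only [hv, if_true]; exact ih st
    · simp only [hv, if_false]
      have := ih (PySem.Set.add st.1 v, st.2 ++ [v])
      simp only [PySem.Set.add_of_not_mem hv, List.length_append] at this ⊢
      omega

theorem pvGrow (g : List (String × List String)) (F : List String) :
    ∀ (st : PySem.Set String × List String),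
      ((F.foldl
        (fun st u => ((PySem.Dict.mk g).getD u []).foldl
          (fun (st : PySem.Set String × List String) v =>
            if v ∈ st.1 then st else (PySem.Set.add st.1 v, st.2 ++ [v])) st) st).1).length
        + st.2.length
      = st.1.length + ((F.foldl
        (fun st u => ((PySem.Dict.mk g).getD u []).foldl
          (fun (st : PySem.Set String × List String) v =>
            if v ∈ st.1 then st else (PySem.Set.add st.1 v, st.2 ++ [v])) st) st).2).length := by
  induction F with
  | nil => intro st; rfl
  | cons u F ih =>
    intro st
    simp only [List.foldl_cons]
    have h1 := pvGrow_inner ((PySem.Dict.mk g).getD u []) st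
    have h2 := ih (((PySem.Dict.mk g).getD u []).foldl
      (fun (st : PySem.Set String × List String) v =>
        if v ∈ st.1 then st else (PySem.Set.add st.1 v, st.2 ++ [v])) st)
    omega

-- main A-side bridge: A's queue loop at any sufficient fuel computes pvLoopB, and the
-- fuel it consumes is bounded by |F| + (growth of seen)
theorem pvMain (g : List (String × List String)) (k : Int) :
    ∀ (n : Nat) (d : Int) (seen : PySem.Set String) (F : List String),
      (k - d).toNat = n →
      ∃ c : Nat, c + seen.length ≤ F.length + (pvLoopB g n seen F).length ∧
        ∀ fuel : Nat,
          pvLoopA g k (c + fuel) seen (F.map (fun u => (u, d))) = pvLoopB g n seen F := by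
  intro n
  induction n with
  | zero =>
    intro d seen F h
    refine ⟨F.length, by simp [pvLoopB], ?_⟩
    intro fuel
    have hd : k ≤ d := by omega
    simpa using pvLoopA_drain g k d hd F fuel seen
  | succ n ih =>
    intro d seen F h
    have hd : d < k := by omega
    have hlvl : ∀ fuel : Nat,
        pvLoopA g k (F.length + fuel) seen (F.map (fun u => (u, d)))
          = pvLoopA g k fuel (pvExpand g seen F).1
              ((pvExpand g seen F).2.map (fun v => (v, d + 1))) := by
      intro fuel
      have := pvLevel g k d hd F [] seen fuel
      simpa [pvExpand] using this
    set st := pvExpand g seen F with hst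
    have hgrow : st.1.length = seen.length + st.2.length := by
      have := pvGrow g F (seen, [])
      simpa [pvExpand, ← hst] using this
    by_cases hemp : st.2 = []
    · refine ⟨F.length, ?_, ?_⟩
      · show F.length + seen.length ≤ F.length + (pvLoopB g (n+1) seen F).length
        rw [pvLoopB]
        simp only [← hst, hemp, if_true]
        omega
      · intro fuel
        have := hlvl fuel
        rw [hemp] at this
        simp only [List.map_nil] at this
        rw [this, pvLoopA_nil, pvLoopB]
        simp [← hst, hemp]
    · obtain ⟨c', hc'len, hc'⟩ := ih (d + 1) st.1 st.2 (by omega)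
      refine ⟨F.length + c', ?_, ?_⟩
      · have hB : pvLoopB g (n+1) seen F = pvLoopB g n st.1 st.2 := by
          rw [pvLoopB]; simp [← hst, hemp]
        rw [hB]; omega
      · intro fuel
        have hA := hlvl (c' + fuel)
        have hB : pvLoopB g (n+1) seen F = pvLoopB g n st.1 st.2 := by
          rw [pvLoopB]; simp [← hst, hemp]
        rw [hB, ← hc' fuel, ← hA]
        congr 1
        omega

-- values looked up in g are neighbour values of g
theorem pvGetD_subset (g : List (String × List String)) (u : String) :
    ∀ v ∈ (PySem.Dict.mk g).getD u [], v ∈ g.flatMap (fun p => p.2) := by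
  induction g with
  | nil => intro v hv; simp [PySem.Dict.getD, PySem.Dict.get?] at hv
  | cons p g ih =>
    intro v hv
    rw [PySem.Dict.getD] at hv
    rcases p with ⟨a, vs⟩
    rw [PySem.Dict.get?_mk_cons] at hv
    by_cases hau : a == u
    · simp only [hau, if_true, Option.getD_some] at hv
      simp [hv]
    · simp only [hau] at hv
      have := ih v (by rw [PySem.Dict.getD]; exact_mod_cast hv)
      simp [this]

-- the expansion fold keeps seen inside S and without duplicates
theorem pvInv_inner (S : List String) (vs : List String) (hvs : ∀ v ∈ vs, v ∈ S) :
    ∀ (st : PySem.Set String × List String), st.1.Nodup → (∀ x ∈ st.1, x ∈ S) →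
      ((vs.foldl
        (fun (st : PySem.Set String × List String) v =>
          if v ∈ st.1 then st else (PySem.Set.add st.1 v, st.2 ++ [v])) st).1).Nodup ∧
      (∀ x ∈ (vs.foldl
        (fun (st : PySem.Set String × List String) v =>
          if v ∈ st.1 then st else (PySem.Set.add st.1 v, st.2 ++ [v])) st).1, x ∈ S) := by
  induction vs with
  | nil => intro st h1 h2; exact ⟨h1, h2⟩
  | cons v vs ih =>
    intro st h1 h2
    simp only [List.foldl_cons]
    by_cases hv : v ∈ st.1
    · simp only [hv, if_true]
      exact ih (fun w hw => hvs w (List.mem_cons_of_mem _ hw)) st h1 h2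
    · simp only [hv, if_false]
      refine ih (fun w hw => hvs w (List.mem_cons_of_mem _ hw))
        (PySem.Set.add st.1 v, st.2 ++ [v]) ?_ ?_
      · exact PySem.Set.nodup_add st.1 v h1
      · intro x hx
        rw [PySem.Set.mem_add] at hx
        rcases hx with hx | hx
        · exact h2 x hx
        · exact hx ▸ hvs v (List.mem_cons_self ..)

theorem pvInv_expand (g : List (String × List String)) (S : List String)
    (hS : ∀ u, ∀ v ∈ (PySem.Dict.mk g).getD u [], v ∈ S) (F : List String) :
    ∀ (st : PySem.Set String × List String), st.1.Nodup → (∀ x ∈ st.1, x ∈ S) →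
      ((F.foldl
        (fun st u => ((PySem.Dict.mk g).getD u []).foldl
          (fun (st : PySem.Set String × List String) v =>
            if v ∈ st.1 then st else (PySem.Set.add st.1 v, st.2 ++ [v])) st) st).1).Nodup ∧
      (∀ x ∈ (F.foldl
        (fun st u => ((PySem.Dict.mk g).getD u []).foldl
          (fun (st : PySem.Set String × List String) v =>
            if v ∈ st.1 then st else (PySem.Set.add st.1 v, st.2 ++ [v])) st) st).1, x ∈ S) := by
  induction F with
  | nil => intro st h1 h2; exact ⟨h1, h2⟩
  | cons u F ih =>
    intro st h1 h2
    simp only [List.foldl_cons]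
    have h := pvInv_inner S ((PySem.Dict.mk g).getD u []) (hS u) st h1 h2
    exact ih _ h.1 h.2

-- pvLoopB's result has no duplicates and stays inside S
theorem pvInv_loopB (g : List (String × List String)) (S : List String)
    (hS : ∀ u, ∀ v ∈ (PySem.Dict.mk g).getD u [], v ∈ S) :
    ∀ (n : Nat) (seen : PySem.Set String) (F : List String),
      seen.Nodup → (∀ x ∈ seen, x ∈ S) →
      (pvLoopB g n seen F).Nodup ∧ (∀ x ∈ pvLoopB g n seen F, x ∈ S) := by
  intro n
  induction n with
  | zero => intro seen F h1 h2; exact ⟨h1, h2⟩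
  | succ n ih =>
    intro seen F h1 h2
    rw [pvLoopB]
    have h := pvInv_expand g S hS F (seen, []) h1 h2
    by_cases hemp : (pvExpand g seen F).2 = []
    · simp only [hemp, if_true]
      exact ⟨(by simpa [pvExpand] using h.1), (by simpa [pvExpand] using h.2)⟩
    · simp only [hemp, if_false]
      exact ih _ _ (by simpa [pvExpand] using h.1) (by simpa [pvExpand] using h.2)

-- nodup + subset bounds the length
theorem pvLen_le (res S : List String) (h1 : res.Nodup) (h2 : ∀ x ∈ res, x ∈ S) :
    res.length ≤ S.length := by
  calc res.length = res.toFinset.card := (List.toFinset_card_of_nodup h1).symm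
    _ ≤ S.toFinset.card := Finset.card_le_card (fun x hx => by
        rw [List.mem_toFinset] at hx ⊢; exact h2 x hx)
    _ ≤ S.length := List.toFinset_card_le S

-- A = pvLoopB (packaged form of the old endgame)
theorem pvA_eq_loopB (g : List (String × List String)) (center : String) (k : Int)
    (hc : (PySem.Dict.mk g).contains center = true) :
    subgraph_k_hop g center k = pvLoopB g k.toNat [center] [center] := by
  unfold subgraph_k_hop
  simp only [hc, if_true]
  obtain ⟨c, hclen, hrun⟩ := pvMain g k k.toNat 0 [center] [center] (by omega)
  set S : List String := center :: g.flatMap (fun p => p.2) with hSdef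
  have hS : ∀ u, ∀ v ∈ (PySem.Dict.mk g).getD u [], v ∈ S := by
    intro u v hv
    exact List.mem_cons_of_mem _ (pvGetD_subset g u v hv)
  have hinv := pvInv_loopB g S hS k.toNat [center] [center]
    (List.nodup_cons.mpr ⟨List.not_mem_nil, List.nodup_nil⟩)
    (fun x hx => by simpa using (by simpa using hx : x = center) ▸ List.mem_cons_self ..)
  have hlen := pvLen_le _ S hinv.1 hinv.2
  have hc' : c ≤ (g.flatMap (fun p => p.2)).length + 1 := by
    simp only [List.length_cons] at hclen hlen
    simp only [hSdef, List.length_cons] at hlen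
    omega
  have := hrun ((g.flatMap (fun p => p.2)).length + 2 - c)
  rw [show c + ((g.flatMap (fun p => p.2)).length + 2 - c)
      = (g.flatMap (fun p => p.2)).length + 2 by omega] at this
  simpa using this

-- ---- B-side: the round-scan dict loop equals the level loop pvLoopB ----

-- coupling between B's (dict, grew) state and the level state (seen set, new-this-round list):
-- the dict is the old pairs L plus the fresh nodes at value r+1, seen is keys(L) ++ fresh,
-- nodup, and grew says "some fresh node exists"
def pvCouple (r : Int) (L : List (String × Int))
    (st : PySem.Dict String Int × Bool) (stB : PySem.Set String × List String) : Prop :=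
  st.1.items = L ++ stB.2.map (fun v => (v, r + 1)) ∧
  stB.1 = L.map Prod.fst ++ stB.2 ∧
  st.2 = !stB.2.isEmpty ∧
  stB.1.Nodup

-- the inner neighbour folds preserve the coupling
theorem pvCouple_inner (_g : List (String × List String)) (r : Int) (L : List (String × Int))
    (vs : List String) :
    ∀ (st : PySem.Dict String Int × Bool) (stB : PySem.Set String × List String),
      pvCouple r L st stB →
      pvCouple r L
        (vs.foldl
          (fun (st : PySem.Dict String Int × Bool) v =>
            if st.1.contains v then st else (st.1.insert v (r + 1), true)) st)
        (vs.foldl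
          (fun (st : PySem.Set String × List String) v =>
            if v ∈ st.1 then st else (PySem.Set.add st.1 v, st.2 ++ [v])) stB) := by
  induction vs with
  | nil => intro st stB h; exact h
  | cons v vs ih =>
    intro st stB h
    obtain ⟨hitems, hseen, hflag, hnd⟩ := h
    simp only [List.foldl_cons]
    have hkeys : st.1.keys = stB.1 := by
      show st.1.items.map Prod.fst = stB.1
      rw [hitems, hseen]
      simp [Function.comp_def]
    have hcont : st.1.contains v = decide (v ∈ stB.1) := by
      rw [PySem.Dict.contains_eq_decide_mem_keys, hkeys]
    by_cases hv : v ∈ stB.1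
    · have : st.1.contains v = true := by rw [hcont]; simpa using hv
      simp only [this, if_true, hv]
      exact ih st stB ⟨hitems, hseen, hflag, hnd⟩
    · have hcf : st.1.contains v = false := by rw [hcont]; simpa using hv
      simp only [hcf, if_false, hv, Bool.false_eq_true]
      refine ih _ _ ⟨?_, ?_, ?_, ?_⟩
      · show (st.1.insert v (r + 1)).items = L ++ ((stB.2 ++ [v]).map (fun v => (v, r + 1)))
        rw [PySem.Dict.items_insert_of_not_contains _ _ hcf, hitems]
        simp
      · show PySem.Set.add stB.1 v = L.map Prod.fst ++ (stB.2 ++ [v])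
        rw [PySem.Set.add_of_not_mem hv, hseen]
        simp
      · cases stB.2 <;> rfl
      · rw [PySem.Set.add_of_not_mem hv]
        refine List.Nodup.append hnd (List.nodup_singleton v) ?_
        simpa [List.disjoint_singleton] using hv

-- the outer fold over a sublist K of the old pairs L acts exactly like the expansion fold
-- over K's value-r members
theorem pvCouple_outer (g : List (String × List String)) (r : Int) (L : List (String × Int)) :
    ∀ (K : List (String × Int)), (∀ p ∈ K, p ∈ L) →
    ∀ (st : PySem.Dict String Int × Bool) (stB : PySem.Set String × List String),
      pvCouple r L st stB →
      pvCouple r L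
        ((K.map Prod.fst).foldl
          (fun (st : PySem.Dict String Int × Bool) u =>
            if st.1.getD u 0 == r then
              ((PySem.Dict.mk g).getD u []).foldl
                (fun (st : PySem.Dict String Int × Bool) v =>
                  if st.1.contains v then st else (st.1.insert v (r + 1), true)) st
            else st) st)
        (((K.filter (fun p => p.2 == r)).map Prod.fst).foldl
          (fun stB u => ((PySem.Dict.mk g).getD u []).foldl
            (fun (st : PySem.Set String × List String) v =>
              if v ∈ st.1 then st else (PySem.Set.add st.1 v, st.2 ++ [v])) stB) stB) := by
  intro K
  induction K with
  | nil => intro _ st stB h; exact h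
  | cons p K ih =>
    intro hK st stB h
    obtain ⟨hitems, hseen, hflag, hnd⟩ := h
    rcases p with ⟨u, val⟩
    have hmem : (u, val) ∈ st.1.items := by
      rw [hitems]
      exact List.mem_append_left _ (hK (u, val) (List.mem_cons_self ..))
    have hndk : st.1.keys.Nodup := by
      show (st.1.items.map Prod.fst).Nodup
      rw [hitems, List.map_append, List.map_map]
      simpa [Function.comp_def, ← hseen] using hnd
    have hget : st.1.getD u 0 = val := PySem.Dict.getD_of_mem_items _ hmem hndk 0
    simp only [List.map_cons, List.foldl_cons, List.filter_cons]
    by_cases hval : val = r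
    · have : (st.1.getD u 0 == r) = true := by rw [hget, hval]; simp
      simp only [this, if_true, hval]
      have hcpl := pvCouple_inner g r L ((PySem.Dict.mk g).getD u []) st stB
        ⟨hitems, hseen, hflag, hnd⟩
      have : ((r : Int) == r) = true := by simp
      simp only [this]
      exact ih (fun q hq => hK q (List.mem_cons_of_mem _ hq)) _ _ hcpl
    · have : (st.1.getD u 0 == r) = false := by rw [hget]; simpa using hval
      simp only [this]
      have hvr : ((val : Int) == r) = false := by simpa using hval
      simp only [hvr]
      exact ih (fun q hq => hK q (List.mem_cons_of_mem _ hq)) st stB ⟨hitems, hseen, hflag, hnd⟩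

-- one round of B, on a dict whose pairs are L (all values ≤ r, keys nodup), is one pvExpand
-- of the value-r frontier
theorem pvRound_eq (g : List (String × List String)) (r : Int) (L : List (String × Int))
    (d : PySem.Dict String Int) (hd : d.items = L) (hnd : (L.map Prod.fst).Nodup) :
    pvCouple r L (pvRound g r d)
      (pvExpand g (L.map Prod.fst) ((L.filter (fun p => p.2 == r)).map Prod.fst)) := by
  have hkeys : d.keys = L.map Prod.fst := by
    show d.items.map Prod.fst = L.map Prod.fst
    rw [hd]
  have h0 : pvCouple r L (d, false) ((L.map Prod.fst : PySem.Set String), []) := by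
    refine ⟨by simp [hd], by simp, by simp, by simpa using hnd⟩
  have := pvCouple_outer g r L L (fun p hp => hp) (d, false) ((L.map Prod.fst : PySem.Set String), []) h0
  rw [pvRound, hkeys, pvExpand]
  exact this

-- B's round loop computes pvLoopB: induction over the remaining rounds, carrying the
-- dict-pairs invariant (values ≤ r, frontier = value-r keys)
theorem pvLoopB2_eq (g : List (String × List String)) :
    ∀ (n : Nat) (r : Int) (L : List (String × Int)) (d : PySem.Dict String Int),
      d.items = L → (L.map Prod.fst).Nodup → (∀ p ∈ L, p.2 ≤ r) →
      (pvLoopB2 g n r d).keys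
        = pvLoopB g n (L.map Prod.fst) ((L.filter (fun p => p.2 == r)).map Prod.fst) := by
  intro n
  induction n with
  | zero =>
    intro r L d hd hnd hval
    show d.items.map Prod.fst = _
    rw [hd, pvLoopB]
  | succ n ih =>
    intro r L d hd hnd hval
    obtain ⟨hitems, hseen, hflag, hndB⟩ := pvRound_eq g r L d hd hnd
    set stB := pvExpand g (L.map Prod.fst) ((L.filter (fun p => p.2 == r)).map Prod.fst)
      with hstB
    rw [pvLoopB2, pvLoopB]
    simp only [← hstB]
    by_cases hemp : stB.2 = []
    · have : (pvRound g r d).2 = false := by rw [hflag, hemp]; rfl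
      simp only [this, if_false, hemp, if_true, Bool.false_eq_true]
      show (pvRound g r d).1.items.map Prod.fst = stB.1
      rw [hitems, hemp, hseen, hemp]
      simp
    · have : (pvRound g r d).2 = true := by
        rw [hflag]
        cases h : stB.2 with
        | nil => exact absurd h hemp
        | cons a l => simp
      simp only [this, if_true, hemp, if_false]
      have hrec := ih (r + 1) (L ++ stB.2.map (fun v => (v, r + 1))) (pvRound g r d).1
        hitems (by simpa [Function.comp_def, ← hseen] using hndB)
        (by
          intro p hp
          rcases List.mem_append.mp hp with hp | hp
          · have := hval p hp; omega
          · obtain ⟨v, _, rfl⟩ := List.mem_map.mp hp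
            simp)
      rw [hrec]
      congr 1
      · rw [hseen]; simp [Function.comp_def]
      · rw [List.filter_append, List.map_append]
        have h1 : L.filter (fun p => p.2 == (r + 1 : Int)) = [] := by
          rw [List.filter_eq_nil_iff]
          intro p hp
          have := hval p hp
          simp only [beq_iff_eq]
          omega
        have h2 : (stB.2.map (fun v => (v, r + 1))).filter (fun p => p.2 == (r + 1 : Int))
            = stB.2.map (fun v => (v, r + 1)) := by
          rw [List.filter_eq_self]
          intro p hp
          obtain ⟨v, _, rfl⟩ := List.mem_map.mp hp
          simp
        rw [h1, h2]
        simp [Function.comp_def]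

-- B's port equals pvLoopB from the singleton start
theorem pvB_eq_loopB (g : List (String × List String)) (center : String) (k : Int)
    (hc : (PySem.Dict.mk g).contains center = true) :
    subgraph_k_hop_alt g center k
      = PySem.Set.ofList (pvLoopB g k.toNat [center] [center]) := by
  unfold subgraph_k_hop_alt
  simp only [hc, if_true]
  have h := pvLoopB2_eq g k.toNat 0 [(center, 0)] (PySem.Dict.mk [(center, 0)])
    (by rfl) (by simp) (by intro p hp; simp at hp; simp [hp])
  rw [h]
  norm_num

-- ===== VERDICT (by name: the statement is the Claim_ definition above) =====
theorem subgraph_k_hop_spec : Claim_equal_subgraph_k_hop := by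
  intro g center k _ _
  unfold Spec_subgraph_k_hop
  by_cases hc : (PySem.Dict.mk g).contains center = true
  · rw [pvA_eq_loopB g center k hc, pvB_eq_loopB g center k hc]
    set S : List String := center :: g.flatMap (fun p => p.2) with hSdef
    have hS : ∀ u, ∀ v ∈ (PySem.Dict.mk g).getD u [], v ∈ S := by
      intro u v hv
      exact List.mem_cons_of_mem _ (pvGetD_subset g u v hv)
    have hinv := pvInv_loopB g S hS k.toNat [center] [center]
      (List.nodup_cons.mpr ⟨List.not_mem_nil, List.nodup_nil⟩)
      (fun x hx => by simpa using (by simpa using hx : x = center) ▸ List.mem_cons_self ..)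
    rw [PySem.Set.ofList_eq_self_of_nodup _ hinv.1]
  · unfold subgraph_k_hop subgraph_k_hop_alt
    simp [hc]
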